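-- pv_equiv track=rewrite | github.com/Domino117204/AiSD | presentation.py | sedgewick_gaps
-- ===== SOURCE A (Python) =====
-- def sedgewick_gaps(n):
--     gaps = []
--     k = 0
--     while True:
--         if k % 2 == 0:
--             gap = 9 * (2 ** k) - 9 * (2 ** (k // 2)) + 1
--         else:
--             gap = 4 ** k + 3 * 2 ** (k - 1) + 1
--
--         if gap >= n:
--             break
--         gaps.append(gap)
--         k += 1
--
--     return gaps[::-1]
-- ===== SOURCE B (Python) =====
-- def sedgewick_gaps(n):
--     # Recursive: build the descending list directly (append after the recursive
--     # call), with both formulas rewritten in terms of j = k // 2; no reversal pass.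
--     def go(k):
--         j = k // 2
--         if k % 2 == 0:
--             g = 9 * (4 ** j) - 9 * (2 ** j) + 1
--         else:
--             g = 4 ** k + 3 * (4 ** j) + 1
--         return [] if g >= n else go(k + 1) + [g]
--     return go(0)
-- ===== Notes on version B (the rewrite author's own statement) =====
-- stated objective: alternative
-- what changed: Replaces the while-loop that appends ascending gaps and then reverses a slice by a recursion that emits the list back-to-front directly (append after the recursive call, no reversal), with the gap formulas rewritten in terms of j = k//2.
import Mathlib
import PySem

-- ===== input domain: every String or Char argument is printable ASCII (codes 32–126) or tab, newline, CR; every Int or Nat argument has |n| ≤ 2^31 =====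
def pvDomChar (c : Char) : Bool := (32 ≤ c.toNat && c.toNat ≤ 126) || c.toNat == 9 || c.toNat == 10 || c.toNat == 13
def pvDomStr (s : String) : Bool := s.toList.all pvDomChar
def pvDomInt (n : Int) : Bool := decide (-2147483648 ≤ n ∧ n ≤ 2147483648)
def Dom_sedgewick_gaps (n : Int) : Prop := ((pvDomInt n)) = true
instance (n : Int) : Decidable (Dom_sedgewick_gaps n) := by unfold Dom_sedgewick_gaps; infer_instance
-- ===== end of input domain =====

-- B changes the decomposition only (recursive back-to-front construction, no reversal); same values, no speed claim.

-- ===== PORT A =====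
-- A's while-True loop, transcribed with a fuel counter (the loop always stops
-- because gap ≥ k+1 eventually reaches n; fuel n.toNat+1 is never exhausted).
def pvLoopA (n : Int) : Nat → List Int → Nat → List Int
  | 0, gaps, _ => gaps.reverse
  | fuel + 1, gaps, k =>
      let gap : Int :=
        if k % 2 == 0 then 9 * 2 ^ k - 9 * 2 ^ (k / 2) + 1
        else 4 ^ k + 3 * 2 ^ (k - 1) + 1
      if gap ≥ n then gaps.reverse
      else pvLoopA n fuel (gaps ++ [gap]) (k + 1)

def sedgewick_gaps (n : Int) : List Int := pvLoopA n (n.toNat + 1) [] 0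

-- ===== PORT B =====
-- B's inner recursion go(k), with the same fuel counter.
def pvGoB (n : Int) : Nat → Nat → List Int
  | _, 0 => []
  | k, fuel + 1 =>
      let j := k / 2
      let g : Int :=
        if k % 2 == 0 then 9 * 4 ^ j - 9 * 2 ^ j + 1
        else 4 ^ k + 3 * 4 ^ j + 1
      if g ≥ n then [] else pvGoB n (k + 1) fuel ++ [g]

def sedgewick_gaps_alt (n : Int) : List Int := pvGoB n 0 (n.toNat + 1)

-- ===== PRECONDITION & SPEC =====
def Spec_sedgewick_gaps (n : Int) (out : List Int) : Prop := out = sedgewick_gaps_alt n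
instance (n : Int) (out : List Int) : Decidable (Spec_sedgewick_gaps n out) := by unfold Spec_sedgewick_gaps; infer_instance

-- ===== CLAIM (what is proved, stated in full; the proofs are below) =====
def Claim_equal_sedgewick_gaps : Prop := ∀ (n : Int), Dom_sedgewick_gaps n → Spec_sedgewick_gaps n (sedgewick_gaps n)

-- ===== LEMMAS AND PROOFS =====

-- A's gap formula at k equals B's: rewrite powers via j = k / 2.
theorem pv_gap_eq (k : Nat) :
    (if k % 2 == 0 then (9 * 2 ^ k - 9 * 2 ^ (k / 2) + 1 : Int)
     else 4 ^ k + 3 * 2 ^ (k - 1) + 1)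
  = (if k % 2 == 0 then (9 * 4 ^ (k / 2) - 9 * 2 ^ (k / 2) + 1 : Int)
     else 4 ^ k + 3 * 4 ^ (k / 2) + 1) := by
  rcases Nat.even_or_odd k with ⟨j, hj⟩ | ⟨j, hj⟩
  · subst hj
    have h2 : j + j = 2 * j := by ring
    simp [Nat.mul_mod_right, h2, pow_mul]
  · subst hj
    have hmod : (2 * j + 1) % 2 = 1 := by omega
    have hdiv : (2 * j + 1) / 2 = j := by omega
    have hsub : 2 * j + 1 - 1 = 2 * j := by omega
    simp [hmod, hdiv, hsub, pow_mul]

-- Loop invariant: A's loop continued from (gaps, k) is B's recursion from k,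
-- followed by the already-accumulated prefix reversed.
theorem pv_loop_eq (n : Int) (fuel : Nat) :
    ∀ (gaps : List Int) (k : Nat),
      pvLoopA n fuel gaps k = pvGoB n k fuel ++ gaps.reverse := by
  induction fuel with
  | zero => intro gaps k; simp [pvLoopA, pvGoB]
  | succ m ih =>
      intro gaps k
      simp only [pvLoopA, pvGoB, pv_gap_eq k]
      split <;> split <;> simp [ih]

-- ===== VERDICT (by name: the statement is the Claim_ definition above) =====
theorem sedgewick_gaps_spec : Claim_equal_sedgewick_gaps := by
  intro n _
  show sedgewick_gaps n = sedgewick_gaps_alt n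
  unfold sedgewick_gaps sedgewick_gaps_alt
  rw [pv_loop_eq]
  simp
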